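-- pv_equiv track=rewrite | github.com/alanmorshinin/MORSHININ | samrabotavshkole/106.py | maasiv4ik
-- ===== SOURCE A (Python) =====
-- def maasiv4ik(a):
--     maxmass = 0
--     cur = 0
--     for i in a:
--         if i % 2 != 0:
--             cur += 1
--             maxmass = max(maxmass, cur)
--         else:
--             cur = 0
--     return maxmass
-- ===== SOURCE B (Python) =====
-- def maasiv4ik(a):
--     # Boundary method: odd runs are the gaps between consecutive even positions.
--     bounds = [-1] + [i for i, x in enumerate(a) if x % 2 == 0] + [len(a)]
--     return max(y - x - 1 for x, y in zip(bounds, bounds[1:]))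
-- ===== Notes on version B (the rewrite author's own statement) =====
-- stated objective: alternative
-- what changed: Instead of threading a running counter, B collects the positions of even elements, pads them with sentinels -1 and len(a), and returns the largest gap minus one between consecutive boundary positions.
import Mathlib
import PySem

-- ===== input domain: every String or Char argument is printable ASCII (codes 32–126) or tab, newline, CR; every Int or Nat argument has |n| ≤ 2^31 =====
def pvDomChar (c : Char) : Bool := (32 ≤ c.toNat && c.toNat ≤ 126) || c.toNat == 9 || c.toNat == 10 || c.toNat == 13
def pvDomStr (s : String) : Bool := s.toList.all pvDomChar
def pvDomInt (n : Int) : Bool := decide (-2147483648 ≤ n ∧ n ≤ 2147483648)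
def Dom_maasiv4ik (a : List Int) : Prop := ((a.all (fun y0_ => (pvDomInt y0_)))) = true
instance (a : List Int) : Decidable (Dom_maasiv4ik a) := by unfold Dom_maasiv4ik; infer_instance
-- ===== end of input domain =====

-- B computes the answer as the largest gap between consecutive even positions (with sentinels)
-- instead of threading a running counter; same return value, no speed claim.

-- ===== PORT A =====
-- A's for-loop threading (maxmass, cur) through the list.
def maasiv4ik (a : List Int) : Int :=
  (a.foldl (fun (st : Int × Int) i =>
      if PySem.Int.mod i 2 ≠ 0 then (max st.1 (st.2 + 1), st.2 + 1)
      else (st.1, 0))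
    (0, 0)).1

-- ===== PORT B =====
-- Python's max(nonempty sequence); the [] branch is unreachable in B (bounds always has ≥ 2 entries).
def pvMaxList : List Int → Int
  | [] => 0
  | g :: gs => gs.foldl max g

-- Source B: bounds = [-1] + [i for i, x in enumerate(a) if x % 2 == 0] + [len(a)];
--       max(y - x - 1 for x, y in zip(bounds, bounds[1:]))   (bounds[1:] = tail here, exact)
def maasiv4ik_alt (a : List Int) : Int :=
  let bounds : List Int :=
    (-1 : Int) :: (((PySem.List.enumerate a 0).filterMap
        (fun p => if PySem.Int.mod p.2 2 = 0 then some p.1 else none)) ++ [(a.length : Int)])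
  pvMaxList ((bounds.zip bounds.tail).map (fun p => p.2 - p.1 - 1))

-- ===== PRECONDITION & SPEC =====
def Spec_maasiv4ik (a : List Int) (out : Int) : Prop := out = maasiv4ik_alt a
instance (a : List Int) (out : Int) : Decidable (Spec_maasiv4ik a out) := by unfold Spec_maasiv4ik; infer_instance

-- ===== CLAIM (what is proved, stated in full; the proofs are below) =====
def Claim_equal_maasiv4ik : Prop := ∀ (a : List Int), Dom_maasiv4ik a → Spec_maasiv4ik a (maasiv4ik a)

-- ===== LEMMAS AND PROOFS =====

def pvOddB (x : Int) : Bool := PySem.Int.mod x 2 != 0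

-- best c t = best achievable run-max over t given a current odd run of length c ending just before t
def pvBest (c : Int) : List Int → Int
  | [] => 0
  | i :: t => if pvOddB i then max (c + 1) (pvBest (c + 1) t) else pvBest 0 t

theorem pvFoldA_eq_best (a : List Int) : ∀ (m c : Int), 0 ≤ c → c ≤ m →
    (a.foldl (fun (st : Int × Int) i =>
        if PySem.Int.mod i 2 ≠ 0 then (max st.1 (st.2 + 1), st.2 + 1)
        else (st.1, 0)) (m, c)).1 = max m (pvBest c a) := by
  induction a with
  | nil => intro m c hc hcm; simp [pvBest]; omega
  | cons i t ih =>
    intro m c hc hcm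
    by_cases h : PySem.Int.mod i 2 = 0
    · have h1 : ¬ (PySem.Int.mod i 2 ≠ 0) := not_not_intro h
      have h2 : pvOddB i = false := by
        simp only [pvOddB, h, bne_self_eq_false]
      rw [List.foldl_cons, pvBest, if_neg h1, h2]
      simp only [Bool.false_eq_true, if_false]
      exact ih m 0 le_rfl (by omega)
    · have h2 : pvOddB i = true := by
        simp only [pvOddB, bne_iff_ne, ne_eq]; exact h
      rw [List.foldl_cons, pvBest, if_pos h, h2]
      simp only [if_true]
      rw [ih (max m (c + 1)) (c + 1) (by omega) (by omega)]
      omega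

theorem pvBest_nonneg : ∀ (t : List Int) (c : Int), 0 ≤ c → 0 ≤ pvBest c t := by
  intro t
  induction t with
  | nil => intro c hc; simp [pvBest]
  | cons i t ih =>
    intro c hc
    by_cases h : pvOddB i
    · rw [pvBest]; simp only [h, if_true]
      have := ih (c + 1) (by omega)
      omega
    · rw [pvBest]; simp only [h, Bool.false_eq_true, if_false]
      exact ih 0 le_rfl

-- positions (starting at offset k) of the even elements
def pvE (k : Int) : List Int → List Int
  | [] => []
  | x :: t => if PySem.Int.mod x 2 = 0 then k :: pvE (k + 1) t else pvE (k + 1) t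

theorem pvE_enum : ∀ (t : List Int) (k : Int),
    (PySem.List.enumerate t k).filterMap
        (fun p => if PySem.Int.mod p.2 2 = 0 then some p.1 else none) = pvE k t := by
  intro t
  induction t with
  | nil => intro k; simp [PySem.List.enumerate_nil, pvE]
  | cons x t ih =>
    intro k
    rw [PySem.List.enumerate_cons, List.filterMap_cons, pvE]
    by_cases h : PySem.Int.mod x 2 = 0
    · simp only [if_pos h, ih]
    · simp only [if_neg h, ih]

-- maximum gap − 1 over the boundary sequence prev :: bs ++ [n]
def pvG (prev : Int) : List Int → Int → Int
  | [], n => n - prev - 1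
  | b :: bs, n => max (b - prev - 1) (pvG b bs n)

theorem pvFoldl_max_max : ∀ (t : List Int) (x h : Int),
    t.foldl max (max x h) = max x (t.foldl max h) := by
  intro t
  induction t with
  | nil => intro x h; simp
  | cons y t ih =>
    intro x h
    simp only [List.foldl_cons]
    rw [max_assoc, ih]

theorem pvMaxList_zip : ∀ (bs : List Int) (prev n : Int),
    pvMaxList ((((prev :: (bs ++ [n])).zip ((prev :: (bs ++ [n])).tail)).map
        (fun p => p.2 - p.1 - 1))) = pvG prev bs n := by
  intro bs
  induction bs with
  | nil => intro prev n; simp [pvMaxList, pvG]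
  | cons b bs ih =>
    intro prev n
    have hr := ih b n
    rw [List.tail_cons] at hr
    cases hzip : ((b :: (bs ++ [n])).zip (bs ++ [n])).map
        (fun p : Int × Int => p.2 - p.1 - 1) with
    | nil =>
      exfalso; cases bs <;> simp at hzip
    | cons g gs =>
      rw [hzip, pvMaxList] at hr
      have hstep : (prev :: (b :: bs ++ [n])).zip ((prev :: (b :: bs ++ [n])).tail)
          = (prev, b) :: ((b :: (bs ++ [n])).zip (bs ++ [n])) := by
        simp
      rw [hstep, List.map_cons, hzip, pvMaxList, pvG, List.foldl_cons, pvFoldl_max_max, hr]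

theorem pvG_best : ∀ (t : List Int) (c k : Int), 0 ≤ c →
    pvG (k - 1 - c) (pvE k t) (k + t.length) = max c (pvBest c t) := by
  intro t
  induction t with
  | nil =>
    intro c k hc
    simp only [pvE, pvG, pvBest, List.length_nil]
    omega
  | cons x t ih =>
    intro c k hc
    by_cases h : PySem.Int.mod x 2 = 0
    · have ho : pvOddB x = false := by simp only [pvOddB, h, bne_self_eq_false]
      rw [pvE, if_pos h, pvG, pvBest]
      simp only [ho, Bool.false_eq_true, if_false, List.length_cons]
      push_cast
      have h0 := ih 0 (k + 1) le_rfl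
      rw [show k + 1 - 1 - 0 = k by ring] at h0
      rw [show k + ((t.length : Int) + 1) = (k + 1) + t.length by ring, h0]
      have hnn := pvBest_nonneg t 0 le_rfl
      omega
    · have ho : pvOddB x = true := by simp only [pvOddB, bne_iff_ne, ne_eq]; exact h
      rw [pvE, if_neg h, pvBest]
      simp only [ho, if_true, List.length_cons]
      push_cast
      have h1 := ih (c + 1) (k + 1) (by omega)
      rw [show k - 1 - c = k + 1 - 1 - (c + 1) by ring,
          show k + ((t.length : Int) + 1) = k + 1 + (t.length : Int) by ring, h1]
      omega

-- ===== VERDICT (by name: the statement is the Claim_ definition above) =====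
theorem maasiv4ik_spec : Claim_equal_maasiv4ik := by
  intro a _
  unfold Spec_maasiv4ik maasiv4ik maasiv4ik_alt
  rw [pvFoldA_eq_best a 0 0 le_rfl le_rfl]
  simp only [pvE_enum]
  rw [pvMaxList_zip (pvE 0 a) (-1) (a.length)]
  have h := pvG_best a 0 0 le_rfl
  simp only [sub_zero, zero_sub, zero_add] at h
  exact h.symm
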